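-- pv_equiv track=rewrite | github.com/dae22/Yandex-Algoritms | Буква на табло.py | p_check
-- ===== SOURCE A (Python) =====
-- def p_check(tab):
--     l, r = tab[0].find('#'), tab[0].rfind('#')
--     flu, mll, fld, ll = 0, 0, 0, 0
--     for i in range(len(tab)):
--         if '#' in tab[i][0:l] or '#' in tab[i][r + 1:]:
--             return False
--     for i in range(len(tab)):
--         if '.' in tab[i][l:r + 1]:
--             break
--         else:
--             flu += 1
--     if flu == 0:
--         return False
--     if flu == len(tab):
--         return False
--     le, re = tab[flu][l:r+1].find('.')+l, tab[flu][l:r+1].rfind('.')+l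
--     if le <= l or re >= r:
--         return False
--     for i in range(flu, len(tab)):
--         if tab[i][l:r+1] == '#' * (r - l + 1):
--             break
--         elif '.' in tab[i][l:le] or '.' in tab[i][re+1:r+1] or '#' in tab[i][le:re+1]:
--             return False
--         mll += 1
--     if mll == 0:
--         return False
--     for i in range(flu+mll, len(tab)):
--         if '.' in tab[i][l:r+1]:
--             break
--         fld += 1
--     if fld == 0:
--         return False
--     for i in range(flu+mll+fld, len(tab)):
--         if '.' in tab[i][l:le] or '#' in tab[i][le:r+1]:
--             return False
--         ll += 1
--     if ll == 0:
--         return False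
--     return True
-- ===== SOURCE B (Python) =====
-- def p_check(tab):
--     l, r = tab[0].find('#'), tab[0].rfind('#')
--     state, top, midc, le, re = 0, 0, 0, -1, -1
--     for row in tab:
--         if '#' in row[0:l] or '#' in row[r + 1:]:
--             return False
--         mid = row[l:r + 1]
--         if state == 0:
--             if '.' not in mid:
--                 top += 1
--                 continue
--             if top == 0:
--                 return False
--             le, re = mid.find('.') + l, mid.rfind('.') + l
--             if le <= l or re >= r:
--                 return False
--             state = 1
--         if state == 1:
--             if mid == '#' * (r - l + 1):
--                 if midc == 0:
--                     return False
--                 state = 2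
--             elif '.' in row[l:le] or '.' in row[re + 1:r + 1] or '#' in row[le:re + 1]:
--                 return False
--             else:
--                 midc += 1
--                 continue
--         if state == 2:
--             if '.' not in mid:
--                 continue
--             state = 3
--         if '.' in row[l:le] or '#' in row[le:r + 1]:
--             return False
--     return state == 3
-- ===== Notes on version B (the rewrite author's own statement) =====
-- stated objective: alternative
-- what changed: A validates the board in five sequential passes (a full out-of-range scan, then four phase loops each restarting from a saved index); B walks the rows exactly once with an explicit section state machine (top-full -> middle-hollow -> bottom-full -> bottom-hollow), checking the out-of-range condition and the current section's row shape per row.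
import Mathlib
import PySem

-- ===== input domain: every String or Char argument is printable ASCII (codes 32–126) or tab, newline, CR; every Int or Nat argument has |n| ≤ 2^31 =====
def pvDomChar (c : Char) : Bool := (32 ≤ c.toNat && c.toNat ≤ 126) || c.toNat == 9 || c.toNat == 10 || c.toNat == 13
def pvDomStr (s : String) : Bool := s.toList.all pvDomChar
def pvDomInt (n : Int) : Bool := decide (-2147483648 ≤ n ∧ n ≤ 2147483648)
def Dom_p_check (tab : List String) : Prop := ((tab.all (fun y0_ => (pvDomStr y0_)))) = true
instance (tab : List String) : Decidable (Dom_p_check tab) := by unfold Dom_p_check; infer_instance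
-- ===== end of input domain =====

-- B replaces A's five sequential index loops (range scan, then four phase loops with counters and
-- a restart index each) by a single walk over the rows driven by an explicit section state machine
-- (objective: alternative decomposition, one pass instead of five; not claimed faster).

-- ===== PORT A =====
-- first loop: '#' outside [l, r] anywhere → False
def aRange (l r : Int) : List String → Bool
  | [] => true
  | row :: rest =>
    if PySem.Str.isIn "#" (PySem.Str.slice row (some 0) (some l))
        || PySem.Str.isIn "#" (PySem.Str.slice row (some (r + 1)) none) then false
    else aRange l r rest

-- second loop: flu = leading rows whose [l:r+1] slice has no '.'
def aFlu (l r : Int) : List String → Nat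
  | [] => 0
  | row :: rest =>
    if PySem.Str.isIn "." (PySem.Str.slice row (some l) (some (r + 1))) then 0
    else aFlu l r rest + 1

-- third loop: none = 'return False', some mll = count until the '#'*(r-l+1) break (or end)
def aMll (l r le re : Int) : List String → Option Nat
  | [] => some 0
  | row :: rest =>
    if PySem.Str.slice row (some l) (some (r + 1))
        == String.ofList (PySem.List.pyRepeat ['#'] (r - l + 1)) then some 0
    else if PySem.Str.isIn "." (PySem.Str.slice row (some l) (some le))
        || PySem.Str.isIn "." (PySem.Str.slice row (some (re + 1)) (some (r + 1)))
        || PySem.Str.isIn "#" (PySem.Str.slice row (some le) (some (re + 1))) then none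
    else (aMll l r le re rest).map (· + 1)

-- fourth loop: fld = rows counted until '.' appears in the [l:r+1] slice
def aFld (l r : Int) : List String → Nat
  | [] => 0
  | row :: rest =>
    if PySem.Str.isIn "." (PySem.Str.slice row (some l) (some (r + 1))) then 0
    else aFld l r rest + 1

-- fifth loop: none = 'return False', some ll = rows counted to the end
def aLl (l r le re : Int) : List String → Option Nat
  | [] => some 0
  | row :: rest =>
    if PySem.Str.isIn "." (PySem.Str.slice row (some l) (some le))
        || PySem.Str.isIn "#" (PySem.Str.slice row (some le) (some (r + 1))) then none
    else (aLl l r le re rest).map (· + 1)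

def p_check (tab : List String) : Bool :=
  match PySem.List.pyGet? tab 0 with
  | none => false  -- tab[0] raises IndexError: excluded by Pre_p_check
  | some t0 =>
    let l := PySem.Str.find t0 "#"
    let r := PySem.Str.rfind t0 "#"
    if aRange l r tab then
      let flu := aFlu l r tab
      if flu = 0 then false
      else if flu = tab.length then false
      else
        match PySem.List.pyGet? tab (flu : Int) with
        | none => false  -- unreachable: flu < len(tab)
        | some frow =>
          let fmid := PySem.Str.slice frow (some l) (some (r + 1))
          let le := PySem.Str.find fmid "." + l
          let re := PySem.Str.rfind fmid "." + l
          if le ≤ l ∨ re ≥ r then false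
          else
            match aMll l r le re (tab.drop flu) with
            | none => false
            | some mll =>
              if mll = 0 then false
              else
                let fld := aFld l r (tab.drop (flu + mll))
                if fld = 0 then false
                else
                  match aLl l r le re (tab.drop (flu + mll + fld)) with
                  | none => false
                  | some ll => if ll = 0 then false else true
    else false

-- ===== PORT B =====
-- one pass; st: 0 = top-full, 1 = middle-hollow, 2 = bottom-full, 3 = bottom-hollow;
-- k1/k2/k3 are the fall-through section blocks of the Python loop body
def bLoop (l r le re : Int) (st top midc : Nat) : List String → Bool
  | [] => st == 3
  | row :: rest =>
    if PySem.Str.isIn "#" (PySem.Str.slice row (some 0) (some l))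
        || PySem.Str.isIn "#" (PySem.Str.slice row (some (r + 1)) none) then false
    else
      let mid := PySem.Str.slice row (some l) (some (r + 1))
      let k3 := fun (le re : Int) =>
        if PySem.Str.isIn "." (PySem.Str.slice row (some l) (some le))
            || PySem.Str.isIn "#" (PySem.Str.slice row (some le) (some (r + 1))) then false
        else bLoop l r le re 3 top midc rest
      let k2 := fun (le re : Int) (midc : Nat) =>
        if !(PySem.Str.isIn "." mid) then bLoop l r le re 2 top midc rest
        else k3 le re
      let k1 := fun (le re : Int) (midc : Nat) =>
        if mid == String.ofList (PySem.List.pyRepeat ['#'] (r - l + 1)) then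
          (if midc = 0 then false else k2 le re midc)
        else if PySem.Str.isIn "." (PySem.Str.slice row (some l) (some le))
            || PySem.Str.isIn "." (PySem.Str.slice row (some (re + 1)) (some (r + 1)))
            || PySem.Str.isIn "#" (PySem.Str.slice row (some le) (some (re + 1))) then false
        else bLoop l r le re 1 top (midc + 1) rest
      match st with
      | 0 =>
        if !(PySem.Str.isIn "." mid) then bLoop l r le re 0 (top + 1) midc rest
        else if top = 0 then false
        else
          let le' := PySem.Str.find mid "." + l
          let re' := PySem.Str.rfind mid "." + l
          if le' ≤ l ∨ re' ≥ r then false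
          else k1 le' re' midc
      | 1 => k1 le re midc
      | 2 => k2 le re midc
      | _ => k3 le re

def p_check_alt (tab : List String) : Bool :=
  match PySem.List.pyGet? tab 0 with
  | none => false  -- tab[0] raises IndexError: excluded by Pre_p_check
  | some t0 =>
    bLoop (PySem.Str.find t0 "#") (PySem.Str.rfind t0 "#") (-1) (-1) 0 0 0 tab

-- ===== PRECONDITION & SPEC =====
-- Pre_ excludes only the empty list, on which A raises IndexError at tab[0] (B raises there too).
def Pre_p_check (tab : List String) : Prop := tab ≠ []
instance (tab : List String) : Decidable (Pre_p_check tab) := by unfold Pre_p_check; infer_instance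
def pvWitness_p_check : List String := ["##", ".#", "##", ".#"]

def Spec_p_check (tab : List String) (out : Bool) : Prop := out = p_check_alt tab
instance (tab : List String) (out : Bool) : Decidable (Spec_p_check tab out) := by unfold Spec_p_check; infer_instance

-- ===== CLAIM (what is proved, stated in full; the proofs are below) =====
def Claim_equal_p_check : Prop := ∀ (tab : List String), Dom_p_check tab → Pre_p_check tab → Spec_p_check tab (p_check tab)

-- ===== LEMMAS AND PROOFS =====

-- A's code after the mll checks, as one function of the remaining rows
def Apost (l r le re : Int) (s : List String) : Bool :=
  let fld := aFld l r s
  if fld = 0 then false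
  else match aLl l r le re (s.drop fld) with
    | none => false
    | some ll => if ll = 0 then false else true

-- A's bottom sections (fourth + fifth loop) as a single recursion
def Atail (l r le re : Int) : List String → Bool
  | [] => false
  | row :: rest =>
    if PySem.Str.isIn "." (PySem.Str.slice row (some l) (some (r + 1))) then
      (aLl l r le re (row :: rest)).isSome
    else Atail l r le re rest

-- A's phases from the middle section on, with midc rows already counted
def phase1 (l r le re : Int) (midc : Nat) (rows : List String) : Bool :=
  match aMll l r le re rows with
  | none => false
  | some k => if midc + k = 0 then false else Apost l r le re (rows.drop k)

-- A's phases from the top section on, in the aFlu/drop form of A's code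
def Aphase0 (l r : Int) (top midc : Nat) (rows : List String) : Bool :=
  let flu := aFlu l r rows
  if top + flu = 0 then false
  else match rows.drop flu with
    | [] => false
    | frow :: rest' =>
      let fmid := PySem.Str.slice frow (some l) (some (r + 1))
      let le := PySem.Str.find fmid "." + l
      let re := PySem.Str.rfind fmid "." + l
      if le ≤ l ∨ re ≥ r then false
      else phase1 l r le re midc (frow :: rest')

-- recursive form of A's top phase, matching the single-pass traversal
def phase0 (l r : Int) (top midc : Nat) : List String → Bool
  | [] => false
  | row :: rest =>
    if PySem.Str.isIn "." (PySem.Str.slice row (some l) (some (r + 1))) then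
      if top = 0 then false
      else
        let le := PySem.Str.find (PySem.Str.slice row (some l) (some (r + 1))) "." + l
        let re := PySem.Str.rfind (PySem.Str.slice row (some l) (some (r + 1))) "." + l
        if le ≤ l ∨ re ≥ r then false
        else phase1 l r le re midc (row :: rest)
    else phase0 l r (top + 1) midc rest

theorem aLl_some_length (l r le re : Int) (s : List String) : ∀ (n : Nat),
    aLl l r le re s = some n → n = s.length := by
  induction s with
  | nil => intro n h; simp only [aLl, Option.some_inj] at h; simp [← h]
  | cons row rest ih =>
    intro n h
    simp only [aLl] at h
    split at h
    · exact absurd h (by simp)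
    · rcases Option.map_eq_some_iff.mp h with ⟨m, hm, rfl⟩
      simp [ih m hm]

theorem aFlu_le_length (l r : Int) (s : List String) : aFlu l r s ≤ s.length := by
  induction s with
  | nil => simp [aFlu]
  | cons row rest ih =>
    simp only [aFlu]
    split
    · simp
    · simpa using ih

theorem hash_no_dot (n : Nat) :
    PySem.Chars.isIn ['.'] (List.replicate n '#') = false := by
  rw [PySem.Chars.isIn_eq_false_iff]
  simp [List.singleton_infix_iff, List.mem_replicate]

theorem hash_no_dot_str (n : Int) :
    PySem.Str.isIn "." (String.ofList (PySem.List.pyRepeat ['#'] n)) = false := by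
  simp [PySem.List.pyRepeat_singleton, hash_no_dot]

theorem postfld (l r le re : Int) (s : List String) :
    (match aLl l r le re (s.drop (aFld l r s)) with
      | none => false
      | some ll => if ll = 0 then false else true) = Atail l r le re s := by
  induction s with
  | nil => simp [aFld, aLl, Atail]
  | cons row rest ih =>
    by_cases h : PySem.Str.isIn "." (PySem.Str.slice row (some l) (some (r + 1))) = true
    · simp only [aFld, List.drop_zero, Atail, if_pos h]
      cases hLl : aLl l r le re (row :: rest) with
      | none => simp
      | some n =>
        have := aLl_some_length l r le re (row :: rest) n hLl
        simp only [this]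
        simp
    · simp only [aFld, if_neg h, Atail, if_neg h, List.drop_succ_cons]
      exact ih

theorem Apost_cons_full (l r le re : Int) (row : String) (rest : List String)
    (h : PySem.Str.isIn "." (PySem.Str.slice row (some l) (some (r + 1))) = false) :
    Apost l r le re (row :: rest) = Atail l r le re rest := by
  simp only [Apost, aFld, h, if_neg (by simp : ¬ (false = true)), Nat.succ_ne_zero,
    List.drop_succ_cons]
  exact postfld l r le re rest

theorem S3 (l r le re : Int) (top midc : Nat) (s : List String) :
    bLoop l r le re 3 top midc s = (aRange l r s && (aLl l r le re s).isSome) := by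
  induction s with
  | nil => simp [bLoop, aRange, aLl]
  | cons row rest ih =>
    simp only [bLoop, aRange, aLl]
    by_cases hR : (PySem.Str.isIn "#" (PySem.Str.slice row (some 0) (some l))
        || PySem.Str.isIn "#" (PySem.Str.slice row (some (r + 1)) none)) = true
    · simp only [hR]; simp
    · simp only [Bool.not_eq_true] at hR
      simp only [hR]
      by_cases hB : (PySem.Str.isIn "." (PySem.Str.slice row (some l) (some le))
          || PySem.Str.isIn "#" (PySem.Str.slice row (some le) (some (r + 1)))) = true
      · simp only [hB]; simp
      · simp only [Bool.not_eq_true] at hB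
        simp only [hB]
        rw [Bool.or_eq_false_iff] at hB
        simp [ih, hB.1, hB.2, Bool.false_eq_true]
theorem S2 (l r le re : Int) (top midc : Nat) (s : List String) :
    bLoop l r le re 2 top midc s = (aRange l r s && Atail l r le re s) := by
  induction s with
  | nil => simp [bLoop, aRange, Atail]
  | cons row rest ih =>
    simp only [bLoop, aRange, Atail]
    by_cases hR : (PySem.Str.isIn "#" (PySem.Str.slice row (some 0) (some l))
        || PySem.Str.isIn "#" (PySem.Str.slice row (some (r + 1)) none)) = true
    · simp only [hR]; simp
    · simp only [Bool.not_eq_true] at hR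
      simp only [hR]
      by_cases hM : PySem.Str.isIn "." (PySem.Str.slice row (some l) (some (r + 1))) = true
      · -- row has '.', B moves to state 3 via k3; A: Atail = (aLl (row::rest)).isSome
        simp only [hM]
        by_cases hB : (PySem.Str.isIn "." (PySem.Str.slice row (some l) (some le))
            || PySem.Str.isIn "#" (PySem.Str.slice row (some le) (some (r + 1)))) = true
        · simp only [hB]; simp only [aLl, hB]; simp
        · simp only [Bool.not_eq_true] at hB
          simp only [hB]
          simp only [aLl, hB]
          simp [S3, Bool.false_eq_true]
      · simp only [Bool.not_eq_true] at hM
        simp only [hM]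
        simp [ih, Bool.false_eq_true]
theorem S1 (l r le re : Int) (top : Nat) (s : List String) : ∀ midc : Nat,
    bLoop l r le re 1 top midc s = (aRange l r s && phase1 l r le re midc s) := by
  induction s with
  | nil =>
    intro midc
    simp [bLoop, aRange, phase1, aMll, Apost, aFld]
  | cons row rest ih =>
    intro midc
    simp only [bLoop, aRange, phase1, aMll]
    by_cases hR : (PySem.Str.isIn "#" (PySem.Str.slice row (some 0) (some l))
        || PySem.Str.isIn "#" (PySem.Str.slice row (some (r + 1)) none)) = true
    · simp only [hR]; simp
    · simp only [Bool.not_eq_true] at hR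
      simp only [hR]
      by_cases hH : (PySem.Str.slice row (some l) (some (r + 1))
          == String.ofList (PySem.List.pyRepeat ['#'] (r - l + 1))) = true
      · have hmid : PySem.Str.slice row (some l) (some (r + 1))
            = String.ofList (PySem.List.pyRepeat ['#'] (r - l + 1)) := by
          exact beq_iff_eq.mp hH
        have hDot : PySem.Str.isIn "." (PySem.Str.slice row (some l) (some (r + 1))) = false := by
          rw [hmid]; exact hash_no_dot_str _
        have hDotC : PySem.Chars.isIn ['.']
            (PySem.List.slice row.toList (some l) (some (r + 1))) = false := by
          simpa using hDot
        have hmid' : PySem.Str.slice row (some l) (some (r + 1))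
            = String.ofList (List.replicate (r - l + 1).toNat '#') := by
          simpa [PySem.List.pyRepeat_singleton] using hmid
        by_cases hm : midc = 0
        · simp [hmid', hm, Bool.false_eq_true]
        · simp [hmid', hm, hash_no_dot, S2, Apost_cons_full l r le re row rest hDot, Bool.false_eq_true]
      · simp only [Bool.not_eq_true] at hH
        simp only [hH]
        by_cases hB : (PySem.Str.isIn "." (PySem.Str.slice row (some l) (some le))
            || PySem.Str.isIn "." (PySem.Str.slice row (some (re + 1)) (some (r + 1)))
            || PySem.Str.isIn "#" (PySem.Str.slice row (some le) (some (re + 1)))) = true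
        · simp only [hB]; simp
        · simp only [Bool.not_eq_true] at hB
          simp only [hB]
          rw [ih (midc + 1)]
          simp only [phase1]
          cases hA : aMll l r le re rest with
          | none => simp [Bool.false_eq_true]
          | some k =>
            simp only [Option.map_some]
            have h1 : midc + (k + 1) ≠ 0 := by omega
            have h2 : midc + 1 + k ≠ 0 := by omega
            simp [h1, h2, Bool.false_eq_true, Nat.add_right_comm]
theorem S0 (l r le0 re0 : Int) (s : List String) : ∀ top midc : Nat,
    bLoop l r le0 re0 0 top midc s = (aRange l r s && phase0 l r top midc s) := by
  induction s with
  | nil =>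
    intro top midc
    simp [bLoop, aRange, phase0]
  | cons row rest ih =>
    intro top midc
    by_cases hR : (PySem.Str.isIn "#" (PySem.Str.slice row (some 0) (some l))
        || PySem.Str.isIn "#" (PySem.Str.slice row (some (r + 1)) none)) = true
    · simp only [bLoop, aRange, hR]; simp
    · by_cases hM : PySem.Str.isIn "." (PySem.Str.slice row (some l) (some (r + 1))) = true
      · by_cases hT : top = 0
        · simp only [Bool.not_eq_true] at hR
          simp only [bLoop, aRange, phase0, hR, hM, hT]
          simp [Bool.false_eq_true]
        · by_cases hG : (PySem.Str.find (PySem.Str.slice row (some l) (some (r + 1))) "." + l ≤ l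
              ∨ PySem.Str.rfind (PySem.Str.slice row (some l) (some (r + 1))) "." + l ≥ r)
          · simp only [Bool.not_eq_true] at hR
            simp only [bLoop, aRange, phase0, hR, hM, if_pos hG]
            simp [hT, Bool.false_eq_true]
          · have h1 := S1 l r
                (PySem.Str.find (PySem.Str.slice row (some l) (some (r + 1))) "." + l)
                (PySem.Str.rfind (PySem.Str.slice row (some l) (some (r + 1))) "." + l)
                top (row :: rest) midc
            simp only [Bool.not_eq_true] at hR
            simp only [phase0, hM, if_neg hG, if_true, if_neg hT]
            rw [← h1]
            simp only [bLoop, hR, hM, if_neg hG]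
            simp [hT, Bool.false_eq_true]
      · simp only [Bool.not_eq_true] at hR hM
        simp only [bLoop, aRange, phase0, hR, hM]
        rw [ih (top + 1) midc]
        simp [aRange, hR, Bool.false_eq_true]
theorem phase0_eq (l r : Int) (s : List String) : ∀ top midc : Nat,
    phase0 l r top midc s = Aphase0 l r top midc s := by
  induction s with
  | nil => intro top midc; simp [phase0, Aphase0, aFlu]
  | cons row rest ih =>
    intro top midc
    by_cases hM : PySem.Str.isIn "." (PySem.Str.slice row (some l) (some (r + 1))) = true
    · simp only [phase0, Aphase0, aFlu, hM]
      simp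
    · simp only [Bool.not_eq_true] at hM
      simp only [phase0, Aphase0, aFlu, hM]
      rw [ih (top + 1) midc]
      have hc : top + (aFlu l r rest + 1) = top + 1 + aFlu l r rest := by omega
      simp [Aphase0, aFlu, hc, List.drop_succ_cons, Bool.false_eq_true]
theorem ab_eq (tab : List String) (h : tab ≠ []) : p_check tab = p_check_alt tab := by
  obtain ⟨t0, rest0, rfl⟩ := List.exists_cons_of_ne_nil h
  have h0 : PySem.List.pyGet? (t0 :: rest0) (0 : Int) = some t0 := by
    simpa using PySem.List.pyGet?_natCast (t0 :: rest0) 0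
  simp only [p_check, p_check_alt, h0]
  rw [S0, phase0_eq]
  set l := PySem.Str.find t0 "#" with hl
  set r := PySem.Str.rfind t0 "#" with hr
  cases hA : aRange l r (t0 :: rest0) with
  | false => simp [hA]
  | true =>
    simp only [hA, if_true, Bool.true_and]
    set tab := t0 :: rest0 with htab
    by_cases hF : aFlu l r tab = 0
    · simp [Aphase0, hF]
    · by_cases hL : aFlu l r tab = tab.length
      · have hD : tab.drop (aFlu l r tab) = [] := by
          rw [hL]; simp
        simp [Aphase0, hF, hD, hL]
      · have hlt : aFlu l r tab < tab.length :=
          lt_of_le_of_ne (aFlu_le_length l r tab) hL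
        obtain ⟨frow, rest', hD⟩ :=
          List.exists_cons_of_ne_nil (by
            intro hnil
            rw [List.drop_eq_nil_iff] at hnil
            omega : tab.drop (aFlu l r tab) ≠ [])
        have hget : PySem.List.pyGet? tab ((aFlu l r tab : Nat) : Int) = some frow := by
          rw [PySem.List.pyGet?_natCast, ← List.head?_drop, hD]
          rfl
        simp only [Aphase0, hF, hD, hget, hL]
        by_cases hG : (PySem.Str.find (PySem.Str.slice frow (some l) (some (r + 1))) "." + l ≤ l
            ∨ PySem.Str.rfind (PySem.Str.slice frow (some l) (some (r + 1))) "." + l ≥ r)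
        · simp only [if_neg hF, if_neg hL, if_pos hG]
          simp
        · simp only [if_neg hG, if_neg hF, if_neg hL, phase1]
          rw [← hD]
          cases hMl : aMll l r (PySem.Str.find (PySem.Str.slice frow (some l) (some (r + 1))) "." + l)
              (PySem.Str.rfind (PySem.Str.slice frow (some l) (some (r + 1))) "." + l)
              (tab.drop (aFlu l r tab)) with
          | none => simp
          | some mll =>
            simp only [Option.some.injEq]
            by_cases hm0 : mll = 0
            · simp [hm0]
            · simp only [hm0, if_neg hm0, Apost]
              have hd2 : (tab.drop (aFlu l r tab)).drop mll
                  = tab.drop (aFlu l r tab + mll) := by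
                rw [List.drop_drop]
              rw [hd2]
              by_cases hf0 : aFld l r (tab.drop (aFlu l r tab + mll)) = 0
              · simp [hf0]
              · have hd3 : (tab.drop (aFlu l r tab + mll)).drop
                      (aFld l r (tab.drop (aFlu l r tab + mll)))
                    = tab.drop (aFlu l r tab + mll
                      + aFld l r (tab.drop (aFlu l r tab + mll))) := by
                  rw [List.drop_drop]
                rw [hd3]
                cases hLl : aLl l r
                    (PySem.Str.find (PySem.Str.slice frow (some l) (some (r + 1))) "." + l)
                    (PySem.Str.rfind (PySem.Str.slice frow (some l) (some (r + 1))) "." + l)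
                    (tab.drop (aFlu l r tab + mll
                      + aFld l r (tab.drop (aFlu l r tab + mll)))) with
                | none => simp [hf0]
                | some ll => simp [hf0, hF, hm0]

-- ===== VERDICT (by name: the statement is the Claim_ definition above) =====
theorem p_check_spec : Claim_equal_p_check := by
  intro tab _ hpre
  exact ab_eq tab hpre
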